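-- pv_equiv track=rewrite | github.com/pshc/imprint | imprint/utils/templatetags/misc.py | recede_url
-- ===== SOURCE A (Python) =====
-- def recede_url(url):
--     cutoff = len(url)
--     parens = url.count('(') - url.count(')')
--     while parens < 0:
--         if cutoff < 1:
--             cutoff = len(url)
--             break
--         c = url[cutoff-1]
--         if c == '(': parens -= 1
--         elif c == ')': parens += 1
--         cutoff -= 1
--     return url[:cutoff], url[cutoff:]
-- ===== SOURCE B (Python) =====
-- def recede_url(url):
--     bal = 0
--     cut = 0
--     for i, c in enumerate(url):
--         if c == '(':
--             bal += 1
--         elif c == ')':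
--             bal -= 1
--         if bal == 0:
--             cut = i + 1
--     if bal >= 0:
--         return url, ''
--     return url[:cut], url[cut:]
-- ===== Notes on version B (the rewrite author's own statement) =====
-- stated objective: alternative
-- what changed: Replaces A's count-both-parens-then-scan-backward trimming loop with a single forward pass that tracks the running paren balance and the last index where it returned to zero, cutting there only when the net balance is negative.
import Mathlib
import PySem

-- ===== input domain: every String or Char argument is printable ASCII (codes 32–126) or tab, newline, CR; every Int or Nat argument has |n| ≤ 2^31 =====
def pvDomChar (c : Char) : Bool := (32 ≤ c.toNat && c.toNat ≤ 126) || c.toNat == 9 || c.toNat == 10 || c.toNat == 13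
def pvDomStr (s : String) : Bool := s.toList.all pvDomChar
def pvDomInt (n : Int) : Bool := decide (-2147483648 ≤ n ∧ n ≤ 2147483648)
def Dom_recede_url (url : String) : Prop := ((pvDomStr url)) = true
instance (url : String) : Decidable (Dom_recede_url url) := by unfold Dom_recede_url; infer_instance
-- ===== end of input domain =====

-- B replaces A's count-then-backward-scan with one forward pass remembering the last balanced prefix boundary (alternative decomposition, same cost).

-- ===== PORT A =====
-- the while loop of A: state (cutoff, parens), scanning backward while parens < 0
def recedeALoop (cs : List Char) (cutoff parens : Int) : Int :=
  if parens < 0 then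
    if cutoff < 1 then (cs.length : Int)
    else
      match PySem.List.pyGet? cs (cutoff - 1) with
      | none => cutoff - 1  -- unreachable: 1 ≤ cutoff ≤ cs.length throughout, so the index is in range
      | some c =>
          recedeALoop cs (cutoff - 1)
            (if c = '(' then parens - 1 else if c = ')' then parens + 1 else parens)
  else cutoff
termination_by cutoff.toNat
decreasing_by omega

def recede_url (url : String) : String × String :=
  let cs := url.toList
  let parens : Int := (PySem.Str.count url "(" : Int) - (PySem.Str.count url ")" : Int)
  let cutoff := recedeALoop cs (cs.length : Int) parens
  (String.ofList (PySem.List.slice cs none (some cutoff)),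
   String.ofList (PySem.List.slice cs (some cutoff) none))

-- ===== PORT B =====
def recede_url_alt (url : String) : String × String :=
  let cs := url.toList
  let st := (PySem.List.enumerate cs 0).foldl
    (fun (s : Int × Int) p =>
      let bal := if p.2 = '(' then s.1 + 1 else if p.2 = ')' then s.1 - 1 else s.1
      (bal, if bal = 0 then p.1 + 1 else s.2)) ((0 : Int), (0 : Int))
  if 0 ≤ st.1 then (url, "")
  else (String.ofList (PySem.List.slice cs none (some st.2)),
        String.ofList (PySem.List.slice cs (some st.2) none))

-- ===== PRECONDITION & SPEC =====
def Spec_recede_url (url : String) (out : String × String) : Prop := out = recede_url_alt url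
instance (url : String) (out : String × String) : Decidable (Spec_recede_url url out) := by unfold Spec_recede_url; infer_instance

-- ===== CLAIM (what is proved, stated in full; the proofs are below) =====
def Claim_equal_recede_url : Prop := ∀ (url : String), Dom_recede_url url → Spec_recede_url url (recede_url url)

-- ===== LEMMAS AND PROOFS =====

-- paren contribution of one character, and balance of a prefix
def balC (c : Char) : Int := if c = '(' then 1 else if c = ')' then -1 else 0
def balL (cs : List Char) : Int := (cs.map balC).sum

-- the largest j ≤ n with balL (cs.take j) = 0
def lastZero (cs : List Char) : Nat → Nat
  | 0 => 0
  | n+1 => if balL (cs.take (n+1)) = 0 then n+1 else lastZero cs n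

theorem balC_bound (c : Char) : -1 ≤ balC c ∧ balC c ≤ 1 := by
  unfold balC; split_ifs <;> omega

theorem balL_count (cs : List Char) :
    balL cs = (cs.count '(' : Int) - (cs.count ')' : Int) := by
  induction cs with
  | nil => simp [balL]
  | cons x t ih =>
    simp only [balL, List.map_cons, List.sum_cons]
    unfold balL at ih
    rw [ih]
    unfold balC
    split_ifs with h1 h2 <;> simp [*] <;> omega

theorem balL_take_succ (cs : List Char) (n : Nat) (h : n < cs.length) :
    balL (cs.take (n+1)) = balL (cs.take n) + balC cs[n] := by
  simp only [balL, List.map_take]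
  rw [List.take_add_one]
  simp [List.getElem?_map, List.getElem?_eq_getElem h]

theorem lastZero_of_zero (cs : List Char) (n : Nat) (h : balL (cs.take n) = 0) :
    lastZero cs n = n := by
  cases n with
  | zero => rfl
  | succ m => simp [lastZero, h]

theorem lastZero_append (xs ys : List Char) (n : Nat) (h : n ≤ xs.length) :
    lastZero (xs ++ ys) n = lastZero xs n := by
  induction n with
  | zero => rfl
  | succ m ih =>
    simp only [lastZero, List.take_append_of_le_length h]
    rw [ih (Nat.le_of_succ_le h)]

-- Chars.count for a single-character needle is List.count
theorem count_go_single (c : Char) (s : List Char) : ∀ (fuel acc : Nat), s.length ≤ fuel →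
    PySem.Chars.count.go [c] fuel s acc = acc + s.count c := by
  induction s with
  | nil => intro fuel acc _; cases fuel <;> simp [PySem.Chars.count.go]
  | cons x t ih =>
    intro fuel acc h
    cases fuel with
    | zero => simp at h
    | succ n =>
      have hn : t.length ≤ n := by simpa using h
      rw [show PySem.Chars.count.go [c] (n+1) (x::t) acc =
            if [c].isPrefixOf (x::t) then PySem.Chars.count.go [c] n t (acc+1)
            else PySem.Chars.count.go [c] n t acc from rfl]
      by_cases hx : x = c
      · simp [List.isPrefixOf, hx, ih n (acc+1) hn]
        omega
      · simp [List.isPrefixOf, Ne.symm hx, hx, ih n acc hn]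

theorem chars_count_single (cs : List Char) (c : Char) :
    PySem.Chars.count cs [c] = cs.count c := by
  simpa [PySem.Chars.count] using count_go_single c cs cs.length 0 le_rfl

-- A's loop computes: stay at n if the prefix balance is already ≥ 0, else the last balanced boundary
theorem ALoop_eq (cs : List Char) : ∀ n : Nat, n ≤ cs.length →
    recedeALoop cs (n : Int) (balL (cs.take n)) =
      if 0 ≤ balL (cs.take n) then (n : Int) else (lastZero cs n : Int) := by
  intro n
  induction n with
  | zero => intro _; rw [recedeALoop]; norm_num [balL, lastZero]
  | succ m ih =>
    intro h
    have hm : m < cs.length := h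
    rw [recedeALoop]
    by_cases hneg : balL (cs.take (m+1)) < 0
    · simp only [hneg, if_true]
      have h1 : ¬ ((m:Int)+1 < 1) := by omega
      push_cast
      rw [if_neg h1]
      have hidx : PySem.List.pyGet? cs ((m:Int) + 1 - 1) = some cs[m] := by
        rw [show (m:Int) + 1 - 1 = (m:Int) by ring, PySem.List.pyGet?_natCast,
          List.getElem?_eq_getElem hm]
      rw [hidx]
      dsimp only
      have hstep : balL (cs.take (m+1)) = balL (cs.take m) + balC cs[m] :=
        balL_take_succ cs m hm
      have harg : (if cs[m] = '(' then balL (cs.take (m+1)) - 1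
          else if cs[m] = ')' then balL (cs.take (m+1)) + 1
          else balL (cs.take (m+1))) = balL (cs.take m) := by
        unfold balC at hstep; split_ifs at hstep ⊢ <;> omega
      have hcast : (m:Int) + 1 - 1 = ((m:Nat) : Int) := by ring
      rw [harg, hcast, ih (Nat.le_of_lt hm)]
      have hb := balC_bound cs[m]
      have hne : balL (cs.take (m+1)) ≠ 0 := by omega
      by_cases hpos : 0 ≤ balL (cs.take m)
      · -- prefix balance at m must be exactly 0
        have hz : balL (cs.take m) = 0 := by omega
        rw [if_pos hpos, if_neg (by omega : ¬ 0 ≤ balL (cs.take (m+1))),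
          lastZero, if_neg hne, lastZero_of_zero cs m hz]
      · rw [if_neg hpos, if_neg (by omega : ¬ 0 ≤ balL (cs.take (m+1))),
          lastZero, if_neg hne]
    · simp only [hneg, if_false]
      rw [if_pos (by omega)]

-- B's fold computes the total balance and the last balanced boundary
theorem BFold_eq (cs : List Char) :
    (PySem.List.enumerate cs 0).foldl
      (fun (s : Int × Int) p =>
        let bal := if p.2 = '(' then s.1 + 1 else if p.2 = ')' then s.1 - 1 else s.1
        (bal, if bal = 0 then p.1 + 1 else s.2)) ((0 : Int), (0 : Int))
    = (balL cs, (lastZero cs cs.length : Int)) := by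
  induction cs using List.reverseRecOn with
  | nil => simp [PySem.List.enumerate, balL, lastZero]
  | append_singleton xs c ih =>
    rw [PySem.List.enumerate_append, List.foldl_append, ih]
    simp only [PySem.List.enumerate_cons, PySem.List.enumerate_nil, List.foldl_cons,
      List.foldl_nil, List.length_append, List.length_cons, List.length_nil]
    have hbal : (if c = '(' then balL xs + 1 else if c = ')' then balL xs - 1 else balL xs)
        = balL (xs ++ [c]) := by
      simp only [balL, List.map_append, List.sum_append, List.map_cons, List.map_nil,
        List.sum_cons, List.sum_nil]
      unfold balC; split_ifs <;> ring
    have htake : (xs ++ [c]).take (xs.length + 1) = xs ++ [c] := by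
      rw [List.take_of_length_le (by simp)]
    have hlz : lastZero (xs ++ [c]) (xs.length + 1)
        = if balL (xs ++ [c]) = 0 then xs.length + 1 else lastZero xs xs.length := by
      rw [lastZero, htake, lastZero_append xs [c] xs.length le_rfl]
    simp only [hbal, hlz]
    by_cases hz : balL (xs ++ [c]) = 0
    · simp [hz]
    · simp [hz]

-- ===== VERDICT (by name: the statement is the Claim_ definition above) =====
theorem recede_url_spec : Claim_equal_recede_url := by
  intro url _
  unfold Spec_recede_url recede_url recede_url_alt
  simp only []
  have hcount : (PySem.Str.count url "(" : Int) - (PySem.Str.count url ")" : Int)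
      = balL url.toList := by
    rw [PySem.Str.count_eq, PySem.Str.count_eq, balL_count,
      show "(".toList = ['('] from rfl, show ")".toList = [')'] from rfl,
      chars_count_single, chars_count_single]
  rw [hcount, BFold_eq]
  have hA : recedeALoop url.toList (url.toList.length : Int) (balL url.toList)
      = if 0 ≤ balL url.toList then (url.toList.length : Int)
        else (lastZero url.toList url.toList.length : Int) := by
    have := ALoop_eq url.toList url.toList.length le_rfl
    rwa [List.take_length] at this
  rw [hA]
  by_cases hpos : 0 ≤ balL url.toList
  · rw [if_pos hpos, if_pos hpos]
    rw [PySem.List.slice_to_natCast, PySem.List.slice_from_natCast,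
      List.take_length, List.drop_length, String.ofList_toList]
  · rw [if_neg hpos, if_neg hpos]
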